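-- pv_equiv track=rewrite | github.com/lychen2/pokemon_teambuilder | poke_analysis-main/default_preset/pokechamp_parse.py | _species_name
-- ===== SOURCE A (Python) =====
-- def _species_name(lines):
--     line = next((item for item in lines if item.startswith("# ")), "")
--     if line:
--         return line[2:].strip()
--     if "No." not in lines:
--         return ""
--     index = lines.index("No.")
--     return lines[index + 2] if index + 2 < len(lines) else ""
-- ===== SOURCE B (Python) =====
-- def _species_name(lines):
--     candidates = []
--     for i, item in enumerate(lines):
--         if item.startswith("# "):
--             candidates.append((0, i, item[2:].strip()))
--         elif item == "No.":
--             candidates.append((1, i, lines[i + 2] if i + 2 < len(lines) else ""))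
--     if not candidates:
--         return ""
--     return min(candidates, key=lambda c: (c[0], c[1]))[2]
-- ===== Notes on version B (the rewrite author's own statement) =====
-- stated objective: alternative
-- what changed: Replaces A's early-exit scans (generator next, 'in' test, list.index, guarded lookup) by a collect-then-select algorithm: one pass materialises every '# ' and 'No.' line as a (priority, index, value) candidate with its answer precomputed, and min over the (priority, index) key picks the result.
import Mathlib
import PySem

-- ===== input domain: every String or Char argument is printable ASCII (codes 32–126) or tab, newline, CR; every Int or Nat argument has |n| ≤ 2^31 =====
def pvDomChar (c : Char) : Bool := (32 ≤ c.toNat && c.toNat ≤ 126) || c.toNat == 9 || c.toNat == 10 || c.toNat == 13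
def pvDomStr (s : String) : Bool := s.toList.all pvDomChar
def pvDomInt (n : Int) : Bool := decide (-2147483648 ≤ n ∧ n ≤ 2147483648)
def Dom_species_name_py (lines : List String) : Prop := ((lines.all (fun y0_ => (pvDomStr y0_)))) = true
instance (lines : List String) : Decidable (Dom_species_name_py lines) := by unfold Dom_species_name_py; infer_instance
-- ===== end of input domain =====

-- B replaces A's early-exit scans by collect-then-select: one pass builds (priority, index, value)
-- candidates with the answer precomputed, and min over the (priority, index) key picks the result.

-- ===== PORT A =====
def species_name_py (lines : List String) : String :=
  let line := (lines.find? (fun item => PySem.Str.startswith item "# ")).getD ""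
  if line ≠ "" then
    PySem.Str.strip (PySem.Str.slice line (some 2) none)
  else if ¬ (lines.contains "No.") then ""
  else
    match PySem.List.index? lines "No." with
    | some index =>
        if index + 2 < lines.length then (PySem.List.pyGet? lines ((index : Int) + 2)).getD "" else ""
    | none => ""   -- unreachable: guarded by the membership test

-- ===== PORT B =====
-- the candidate-building loop of Source B: 'if startswith: append (0,i,strip); elif == "No.": append (1,i,guarded lookup)'
def snpCandidates (lines : List String) : List (Int × Int × String) :=
  (PySem.List.enumerate lines 0).foldl
    (fun acc p =>
      if PySem.Str.startswith p.2 "# " then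
        acc ++ [(0, p.1, PySem.Str.strip (PySem.Str.slice p.2 (some 2) none))]
      else if p.2 == "No." then
        acc ++ [(1, p.1, if p.1 + 2 < (lines.length : Int) then (PySem.List.pyGet? lines (p.1 + 2)).getD "" else "")]
      else acc)
    []

def species_name_py_alt (lines : List String) : String :=
  match PySem.List.min2? (snpCandidates lines) (fun c => c.1) (fun c => c.2.1) with
  | none => ""          -- candidates empty
  | some c => c.2.2

-- ===== PRECONDITION & SPEC =====
def Spec_species_name_py (lines : List String) (out : String) : Prop := out = species_name_py_alt lines
instance (lines : List String) (out : String) : Decidable (Spec_species_name_py lines out) := by unfold Spec_species_name_py; infer_instance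

-- ===== CLAIM (what is proved, stated in full; the proofs are below) =====
def Claim_equal_species_name_py : Prop := ∀ (lines : List String), Dom_species_name_py lines → Spec_species_name_py lines (species_name_py lines)

-- ===== LEMMAS AND PROOFS =====

-- the per-line candidate generator (value function v abstracted: v i = lines[i+2]-with-guard)
def snpGen (v : Int → String) (p : Int × String) : List (Int × Int × String) :=
  if PySem.Str.startswith p.2 "# " then [(0, p.1, PySem.Str.strip (PySem.Str.slice p.2 (some 2) none))]
  else if p.2 == "No." then [(1, p.1, v p.1)]
  else []

def snpVal (lines : List String) (i : Int) : String :=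
  if i + 2 < (lines.length : Int) then (PySem.List.pyGet? lines (i + 2)).getD "" else ""

-- the fold step of PySem.List.min2? with key (c.1, c.2.1), named so lemmas can talk about it
def snpMinStep (acc : Option (Int × Int × String)) (x : Int × Int × String) :
    Option (Int × Int × String) :=
  match acc with
  | none => some x
  | some m =>
    if (decide (x.1 < m.1) || !decide (m.1 < x.1) && decide (x.2.1 < m.2.1)) = true then some x else some m

theorem snp_min2_eq_foldl (cs : List (Int × Int × String)) :
    PySem.List.min2? cs (fun c => c.1) (fun c => c.2.1) = cs.foldl snpMinStep none := by
  unfold PySem.List.min2? snpMinStep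
  congr 1
  funext acc x
  cases acc <;> rfl

theorem snpCandidates_eq_flatMap (lines : List String) :
    snpCandidates lines = (PySem.List.enumerate lines 0).flatMap (snpGen (snpVal lines)) := by
  unfold snpCandidates
  have hfun : (fun (acc : List (Int × Int × String)) (p : Int × String) =>
      if PySem.Str.startswith p.2 "# " then
        acc ++ [(0, p.1, PySem.Str.strip (PySem.Str.slice p.2 (some 2) none))]
      else if p.2 == "No." then
        acc ++ [(1, p.1, if p.1 + 2 < (lines.length : Int) then (PySem.List.pyGet? lines (p.1 + 2)).getD "" else "")]
      else acc) = fun acc p => acc ++ snpGen (snpVal lines) p := by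
    funext acc p
    unfold snpGen snpVal
    split_ifs <;> simp
  rw [hfun]
  simpa using PySem.List.foldl_append_eq_flatMap (snpGen (snpVal lines)) (PySem.List.enumerate lines 0) []

-- priorities are 0 or 1
theorem snpGen_pri {v : Int → String} {p : Int × String} {c : Int × Int × String}
    (hc : c ∈ snpGen v p) : c.1 = 0 ∨ c.1 = 1 := by
  unfold snpGen at hc; split_ifs at hc <;> simp_all

-- every candidate carries its source index
theorem snpGen_idx {v : Int → String} {p : Int × String} {c : Int × Int × String}
    (hc : c ∈ snpGen v p) : c.2.1 = p.1 := by
  unfold snpGen at hc; split_ifs at hc <;> simp_all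

theorem snp_idx_ge (v : Int → String) (ls : List String) (s : Int) :
    ∀ c ∈ (PySem.List.enumerate ls s).flatMap (snpGen v), s ≤ c.2.1 := by
  induction ls generalizing s with
  | nil => simp [PySem.List.enumerate_nil]
  | cons x xs ih =>
      rw [PySem.List.enumerate_cons]
      intro c hc
      simp only [List.flatMap_cons, List.mem_append] at hc
      rcases hc with h | h
      · rw [snpGen_idx h]
      · exact le_trans (by omega) (ih (s + 1) c h)

theorem snp_idx_pairwise (v : Int → String) (ls : List String) (s : Int) :
    ((PySem.List.enumerate ls s).flatMap (snpGen v)).Pairwise (fun a b => a.2.1 < b.2.1) := by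
  induction ls generalizing s with
  | nil => simp [PySem.List.enumerate_nil]
  | cons x xs ih =>
      rw [PySem.List.enumerate_cons]
      simp only [List.flatMap_cons]
      refine List.pairwise_append.mpr ⟨?_, ih (s + 1), ?_⟩
      · unfold snpGen; split_ifs <;> simp
      · intro a ha b hb
        have h1 := snpGen_idx ha
        have h2 := snp_idx_ge v xs (s + 1) b hb
        omega

-- a priority-0 leader with index below everything keeps the lead
theorem snp_min_keep (cs : List (Int × Int × String)) (m : Int × Int × String)
    (hm : m.1 = 0) (h01 : ∀ c ∈ cs, c.1 = 0 ∨ c.1 = 1) (hlt : ∀ c ∈ cs, m.2.1 < c.2.1) :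
    cs.foldl snpMinStep (some m) = some m := by
  induction cs with
  | nil => rfl
  | cons c cs ih =>
      have h1 := h01 c (by simp)
      have h2 := hlt c (by simp)
      have hstep : snpMinStep (some m) c = some m := by
        unfold snpMinStep
        rcases h1 with h | h
        · have hnlt : ¬ (c.2.1 < m.2.1) := by omega
          simp [h, hm, hnlt]
        · simp [h, hm]
      simp only [List.foldl_cons, hstep]
      exact ih (fun x hx => h01 x (by simp [hx])) (fun x hx => hlt x (by simp [hx]))

-- a priority-1 leader below all indices is beaten exactly by the first priority-0 candidate
theorem snp_min_seek (cs : List (Int × Int × String)) (m : Int × Int × String)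
    (hm : m.1 = 1) (h01 : ∀ c ∈ cs, c.1 = 0 ∨ c.1 = 1) (hlt : ∀ c ∈ cs, m.2.1 < c.2.1)
    (hpw : cs.Pairwise (fun a b => a.2.1 < b.2.1)) :
    cs.foldl snpMinStep (some m) = some ((cs.find? (fun c => c.1 == 0)).getD m) := by
  induction cs with
  | nil => rfl
  | cons c cs ih =>
      have hpw' := List.pairwise_cons.mp hpw
      rcases h01 c (by simp) with h | h
      · have hstep : snpMinStep (some m) c = some c := by
          unfold snpMinStep; simp [h, hm]
        simp only [List.foldl_cons, hstep]
        rw [snp_min_keep cs c h (fun x hx => h01 x (by simp [hx])) hpw'.1]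
        simp [h]
      · have hstep : snpMinStep (some m) c = some m := by
          have h2 := hlt c (by simp)
          have hnlt : ¬ (c.2.1 < m.2.1) := by omega
          unfold snpMinStep; simp [h, hm, hnlt]
        simp only [List.foldl_cons, hstep]
        rw [ih (fun x hx => h01 x (by simp [hx])) (fun x hx => hlt x (by simp [hx])) hpw'.2]
        have hc0 : (c.1 == 0) = false := by simp [h]
        simp [hc0]

-- min2? over a 0/1-priority, index-increasing candidate list = first priority-0 candidate, else the head
theorem snp_min2_char (cs : List (Int × Int × String))
    (h01 : ∀ c ∈ cs, c.1 = 0 ∨ c.1 = 1) (hpw : cs.Pairwise (fun a b => a.2.1 < b.2.1)) :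
    PySem.List.min2? cs (fun c => c.1) (fun c => c.2.1) =
      (cs.find? (fun c => c.1 == 0)).or cs.head? := by
  rw [snp_min2_eq_foldl]
  cases cs with
  | nil => rfl
  | cons c cs =>
      have hpw' := List.pairwise_cons.mp hpw
      have hfirst : snpMinStep none c = some c := rfl
      simp only [List.foldl_cons, hfirst]
      rcases h01 c (by simp) with h | h
      · rw [snp_min_keep cs c h (fun x hx => h01 x (by simp [hx])) hpw'.1]
        simp [h]
      · rw [snp_min_seek cs c h (fun x hx => h01 x (by simp [hx])) hpw'.1 hpw'.2]
        have hc0 : (c.1 == 0) = false := by simp [h]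
        simp only [List.find?_cons, hc0]
        cases cs.find? (fun c => c.1 == 0) <;> simp [Option.or]

-- no '# ' line in ls → no priority-0 candidate
theorem snp_find0_none (v : Int → String) (ls : List String) (s : Int)
    (h : ls.find? (fun item => PySem.Str.startswith item "# ") = none) :
    ((PySem.List.enumerate ls s).flatMap (snpGen v)).find? (fun c => c.1 == 0) = none := by
  induction ls generalizing s with
  | nil => simp [PySem.List.enumerate_nil]
  | cons x xs ih =>
      cases hsw : PySem.Str.startswith x "# " with
      | true => rw [List.find?_cons_of_pos (p := fun item => PySem.Str.startswith item "# ") hsw] at h; simp at h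
      | false =>
          rw [List.find?_cons_of_neg (p := fun item => PySem.Str.startswith item "# ") (by simpa using hsw)] at h
          rw [PySem.List.enumerate_cons]
          simp only [List.flatMap_cons, List.find?_append, ih (s + 1) h]
          have hg : snpGen v (s, x) = [] ∨ snpGen v (s, x) = [(1, s, v s)] := by
            unfold snpGen
            rw [if_neg (by simpa using hsw)]
            by_cases hx : (x == "No.") = true <;> simp [hx]
          rcases hg with hg | hg <;> rw [hg] <;> simp

-- first '# ' line hl → first priority-0 candidate carries strip(hl[2:])
theorem snp_find0_some (v : Int → String) (ls : List String) (s : Int) (hl : String)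
    (h : ls.find? (fun item => PySem.Str.startswith item "# ") = some hl) :
    ∃ j, ((PySem.List.enumerate ls s).flatMap (snpGen v)).find? (fun c => c.1 == 0) =
      some (0, j, PySem.Str.strip (PySem.Str.slice hl (some 2) none)) := by
  induction ls generalizing s with
  | nil => simp at h
  | cons x xs ih =>
      rw [PySem.List.enumerate_cons]
      simp only [List.flatMap_cons, List.find?_append]
      cases hsw : PySem.Str.startswith x "# " with
      | true =>
          rw [List.find?_cons_of_pos (p := fun item => PySem.Str.startswith item "# ") hsw] at h
          cases h
          refine ⟨s, ?_⟩
          have hg : snpGen v (s, hl) = [(0, s, PySem.Str.strip (PySem.Str.slice hl (some 2) none))] := by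
            unfold snpGen; rw [if_pos hsw]
          rw [hg]; simp
      | false =>
          rw [List.find?_cons_of_neg (p := fun item => PySem.Str.startswith item "# ") (by simpa using hsw)] at h
          obtain ⟨j, hj⟩ := ih (s + 1) h
          refine ⟨j, ?_⟩
          rw [hj]
          have hg : snpGen v (s, x) = [] ∨ snpGen v (s, x) = [(1, s, v s)] := by
            unfold snpGen
            rw [if_neg (by simpa using hsw)]
            by_cases hx : (x == "No.") = true <;> simp [hx]
          rcases hg with hg | hg <;> rw [hg] <;> simp

-- no '# ' line → the candidate list's head is the first 'No.' with its precomputed value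
theorem snp_head_no (v : Int → String) (ls : List String) (s : Int)
    (h : ls.find? (fun item => PySem.Str.startswith item "# ") = none) :
    ((PySem.List.enumerate ls s).flatMap (snpGen v)).head? =
      (PySem.List.index? ls "No.").map (fun k => (1, s + (k : Int), v (s + (k : Int)))) := by
  induction ls generalizing s with
  | nil => simp [PySem.List.enumerate_nil]
  | cons x xs ih =>
      cases hsw : PySem.Str.startswith x "# " with
      | true => rw [List.find?_cons_of_pos (p := fun item => PySem.Str.startswith item "# ") hsw] at h; simp at h
      | false =>
          rw [List.find?_cons_of_neg (p := fun item => PySem.Str.startswith item "# ") (by simpa using hsw)] at h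
          rw [PySem.List.enumerate_cons]
          simp only [List.flatMap_cons]
          by_cases hx : x = "No."
          · subst hx
            rw [PySem.List.index?_cons_self]
            have hg : snpGen v (s, "No.") = [(1, s, v s)] := by
              unfold snpGen
              rw [if_neg (by simpa using hsw), if_pos (by simp)]
            rw [hg]; simp
          · have hb : (x == "No.") = false := by simpa using hx
            rw [PySem.List.index?_cons_of_ne (x := x) (v := "No.") xs hx]
            have hg : snpGen v (s, x) = [] := by
              unfold snpGen
              rw [if_neg (by simpa using hsw), if_neg (by simp [hb])]
            rw [hg, List.nil_append, ih (s + 1) h]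
            cases PySem.List.index? xs "No." with
            | none => simp
            | some k =>
                have hks : s + 1 + (k : Int) = s + (((k : Nat) + 1 : Nat) : Int) := by push_cast; ring
                simp [hks]

-- a line starting with "# " is not empty
theorem snp_startswith_ne (h : String) (hh : PySem.Str.startswith h "# " = true) : h ≠ "" := by
  rintro rfl; revert hh; decide

-- ===== VERDICT (by name: the statement is the Claim_ definition above) =====
theorem species_name_py_spec : Claim_equal_species_name_py := by
  intro lines _
  unfold Spec_species_name_py species_name_py species_name_py_alt
  rw [snpCandidates_eq_flatMap,
      snp_min2_char _ (fun c hc => by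
          obtain ⟨p, _, hp⟩ := List.mem_flatMap.mp hc
          exact snpGen_pri hp)
        (snp_idx_pairwise _ lines 0)]
  cases hf : lines.find? (fun item => PySem.Str.startswith item "# ") with
  | some h =>
      obtain ⟨j, hj⟩ := snp_find0_some (snpVal lines) lines 0 h hf
      rw [hj]
      have hsw := List.find?_some (p := fun item => PySem.Str.startswith item "# ") hf
      have hne := snp_startswith_ne h hsw
      simp [Option.or, hne]
  | none =>
      rw [snp_find0_none (snpVal lines) lines 0 hf, snp_head_no (snpVal lines) lines 0 hf]
      cases hidx : PySem.List.index? lines "No." with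
      | none =>
          have hnm : "No." ∉ lines := (PySem.List.index?_eq_none_iff lines "No.").mp hidx
          simp [Option.or, hnm]
      | some k =>
          have hm : "No." ∈ lines :=
            (PySem.List.index?_isSome_iff lines "No.").mp (by rw [hidx]; rfl)
          by_cases hk : k + 2 < lines.length
          · have h1 : ((k : Int) + 2 < (lines.length : Int)) := by exact_mod_cast hk
            simp [snpVal, hm, hk, h1]
          · have h1 : ¬ ((k : Int) + 2 < (lines.length : Int)) := by
              intro hc; exact hk (by exact_mod_cast hc)
            simp [snpVal, hm, hk, h1]
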